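-- pv_equiv track=rewrite | github.com/forsummer/Gondar | gondar/tools/entrez.py | merge_short_strings_recursive
-- ===== SOURCE A (Python) =====
-- from typing import Callable, Dict, Generator, Iterator, List
--
-- def merge_short_strings_recursive(data: List[str]) -> List[str]:
--     if len(data) == 0:
--         return []
--
--     current_sentence = data[0]
--
--     if len(data) > 1 and len(data[1]) < 80:
--         return merge_short_strings_recursive([current_sentence + data[1]] + data[2:])
--     else:
--         return [current_sentence] + merge_short_strings_recursive(data[1:])
-- ===== SOURCE B (Python) =====
-- from typing import List
--
--
-- def merge_short_strings_recursive(data: List[str]) -> List[str]: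
--     if not data:
--         return []
--     breaks = [0] + [i for i in range(1, len(data)) if len(data[i]) >= 80]
--     ends = breaks[1:] + [len(data)]
--     return [''.join(data[s:e]) for s, e in zip(breaks, ends)]
-- ===== Notes on version B (the rewrite author's own statement) =====
-- stated objective: faster
-- what changed: Replaces the recursive merge-as-you-go scan (which rebuilds the remaining list and re-concatenates the growing group string on every step) with one pass collecting break indices (index 0 plus every i>=1 with len(data[i])>=80) followed by joining each index segment with ''.join.
import Mathlib
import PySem

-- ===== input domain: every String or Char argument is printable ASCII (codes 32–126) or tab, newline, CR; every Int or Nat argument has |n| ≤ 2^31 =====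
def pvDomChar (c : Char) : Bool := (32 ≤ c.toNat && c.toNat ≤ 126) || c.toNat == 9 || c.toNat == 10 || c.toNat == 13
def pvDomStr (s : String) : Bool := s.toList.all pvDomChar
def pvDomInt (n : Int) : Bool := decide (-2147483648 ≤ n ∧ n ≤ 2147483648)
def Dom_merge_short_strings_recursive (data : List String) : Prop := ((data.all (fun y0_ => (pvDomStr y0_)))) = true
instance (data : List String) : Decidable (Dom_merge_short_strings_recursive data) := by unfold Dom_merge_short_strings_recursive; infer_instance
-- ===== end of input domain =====

-- B replaces A's recursive merge-as-you-go scan by a break-index pass plus a segment-joining pass (faster: no per-step list rebuilding / repeated concatenation).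

-- ===== PORT A =====
def merge_short_strings_recursive : List String → List String
  | [] => []
  | [x] => [x]                                   -- else-branch: [current_sentence] + rec([])
  | x :: y :: ys =>
    if PySem.Str.len y < 80 then
      merge_short_strings_recursive ((x ++ y) :: ys)
    else
      x :: merge_short_strings_recursive (y :: ys)
termination_by l => l.length
decreasing_by all_goals simp

-- ===== PORT B =====
-- break indices: 0 is implicit (prepended below); here every i >= 1 with len(data[i]) >= 80
def pvBrks (data : List String) : List Nat :=
  (List.range' 1 (data.length - 1)).filter (fun i => decide (80 ≤ PySem.Str.len (data.getD i "")))

def merge_short_strings_recursive_alt (data : List String) : List String :=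
  match data with
  | [] => []
  | _ :: _ =>
    let breaks := 0 :: pvBrks data
    let ends := breaks.tail ++ [data.length]
    (breaks.zip ends).map (fun p => PySem.Str.join "" ((data.drop p.1).take (p.2 - p.1)))

-- ===== PRECONDITION & SPEC =====
def Spec_merge_short_strings_recursive (data : List String) (out : List String) : Prop := out = merge_short_strings_recursive_alt data
instance (data : List String) (out : List String) : Decidable (Spec_merge_short_strings_recursive data out) := by unfold Spec_merge_short_strings_recursive; infer_instance

-- ===== CLAIM (what is proved, stated in full; the proofs are below) =====
def Claim_equal_merge_short_strings_recursive : Prop := ∀ (data : List String), Dom_merge_short_strings_recursive data → Spec_merge_short_strings_recursive data (merge_short_strings_recursive data)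

-- ===== LEMMAS AND PROOFS =====

-- common recursive characterisation both ports are reduced to
def pvGo (c : String) : List String → List String
  | [] => [c]
  | y :: ys => if PySem.Str.len y < 80 then pvGo (c ++ y) ys else c :: pvGo y ys

-- B's zip-of-breaks rendered as a structural recursion over the break list
def pvSegs (data : List String) (s : Nat) : List Nat → List String
  | [] => [PySem.Str.join "" ((data.drop s).take (data.length - s))]
  | e :: rest => PySem.Str.join "" ((data.drop s).take (e - s)) :: pvSegs data e rest

lemma pvJoin_one (x : String) : PySem.Str.join "" [x] = x := by
  apply String.toList_inj.mp
  simp [PySem.Str.toList_join, PySem.Chars.join_singleton]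

lemma pvJoin_merge (x y : String) (l : List String) :
    PySem.Str.join "" (x :: y :: l) = PySem.Str.join "" ((x ++ y) :: l) := by
  apply String.toList_inj.mp
  cases l with
  | nil =>
    rw [PySem.Str.toList_join, PySem.Str.toList_join]
    simp [PySem.Chars.join_cons_cons, PySem.Chars.join_singleton]
  | cons a l' =>
    rw [PySem.Str.toList_join, PySem.Str.toList_join]
    simp [PySem.Chars.join_cons_cons]

lemma pvZip_eq_segs (data : List String) (bs : List Nat) (s : Nat) :
    ((s :: bs).zip (bs ++ [data.length])).map
        (fun p => PySem.Str.join "" ((data.drop p.1).take (p.2 - p.1)))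
      = pvSegs data s bs := by
  induction bs generalizing s with
  | nil => simp [pvSegs]
  | cons e rest ih => simp [pvSegs, List.zip_cons_cons, ih]

lemma pvSegs_tail (x : String) (rest : List String) (bs : List Nat) (t : Nat) :
    pvSegs (x :: rest) (t + 1) (bs.map (· + 1)) = pvSegs rest t bs := by
  induction bs generalizing t with
  | nil =>
    simp only [List.map_nil, pvSegs, List.drop_succ_cons, List.length_cons]
    rw [Nat.add_sub_add_right]
  | cons e bs' ih =>
    simp only [List.map_cons, pvSegs, List.drop_succ_cons, Nat.add_sub_add_right]
    rw [ih]

lemma pvSegs_head_congr (a b : String) (rest : List String) (bs : List Nat) (t : Nat)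
    (h : ∀ e ∈ bs, 1 ≤ e) :
    pvSegs (a :: rest) (t + 1) bs = pvSegs (b :: rest) (t + 1) bs := by
  induction bs generalizing t with
  | nil => simp [pvSegs]
  | cons e bs' ih =>
    obtain ⟨u, rfl⟩ : ∃ u, e = u + 1 := ⟨e - 1, by have := h e (by simp); omega⟩
    simp only [pvSegs, List.drop_succ_cons]
    exact congrArg _ (ih u (fun e he => h e (by simp [he])))

lemma pvBrks_pos (data : List String) : ∀ e ∈ pvBrks data, 1 ≤ e := by
  intro e he
  simp only [pvBrks, List.mem_filter, List.mem_range'_1] at he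
  omega

-- the break predicate only looks at the tail beyond index 1, whatever the first two/one entries are
lemma pvFilter_shift (x y z : String) (ys : List String) :
    (List.range' 1 ys.length).filter
        ((fun i => decide (80 ≤ PySem.Str.len ((x :: y :: ys).getD i ""))) ∘ (· + 1))
      = (List.range' 1 ys.length).filter (fun i => decide (80 ≤ PySem.Str.len ((z :: ys).getD i ""))) := by
  apply List.filter_congr
  intro i hi
  rw [List.mem_range'_1] at hi
  obtain ⟨j, rfl⟩ : ∃ j, i = j + 1 := ⟨i - 1, by omega⟩
  simp

lemma pvBrks_short (x y : String) (ys : List String) (h : PySem.Str.len y < 80) :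
    pvBrks (x :: y :: ys) = (pvBrks ((x ++ y) :: ys)).map (· + 1) := by
  simp only [pvBrks, List.length_cons, Nat.add_sub_cancel]
  rw [List.range'_succ, List.filter_cons_of_neg (by simp; simp at h; omega),
    List.range'_succ_left, List.filter_map, pvFilter_shift x y (x ++ y) ys]

lemma pvBrks_long (x y : String) (ys : List String) (h : 80 ≤ PySem.Str.len y) :
    pvBrks (x :: y :: ys) = 1 :: (pvBrks (y :: ys)).map (· + 1) := by
  simp only [pvBrks, List.length_cons, Nat.add_sub_cancel]
  rw [List.range'_succ, List.filter_cons_of_pos (by simp; simp at h; omega),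
    List.range'_succ_left, List.filter_map, pvFilter_shift x y y ys]

lemma pvAlt_eq_segs (x : String) (xs : List String) :
    merge_short_strings_recursive_alt (x :: xs) = pvSegs (x :: xs) 0 (pvBrks (x :: xs)) := by
  simp only [merge_short_strings_recursive_alt, List.tail_cons]
  exact pvZip_eq_segs (x :: xs) (pvBrks (x :: xs)) 0

lemma pvSegs_merge (x y : String) (ys : List String) (bs : List Nat) (hbs : ∀ e ∈ bs, 1 ≤ e) :
    pvSegs (x :: y :: ys) 0 (bs.map (· + 1)) = pvSegs ((x ++ y) :: ys) 0 bs := by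
  cases bs with
  | nil =>
    simp only [List.map_nil, pvSegs, List.drop_zero, Nat.sub_zero]
    rw [List.take_of_length_le (by simp), List.take_of_length_le (by simp)]
    exact congrArg (fun s => [s]) (pvJoin_merge x y ys)
  | cons e rest =>
    obtain ⟨u, rfl⟩ : ∃ u, e = u + 1 := ⟨e - 1, by have := hbs e List.mem_cons_self; omega⟩
    simp only [List.map_cons, pvSegs, List.drop_zero, Nat.sub_zero]
    refine congrArg₂ _ ?_ ?_
    · rw [show u + 1 + 1 = u + 2 from rfl, List.take_succ_cons, List.take_succ_cons,
        List.take_succ_cons]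
      exact pvJoin_merge x y (ys.take u)
    · rw [show u + 1 + 1 = (u + 1) + 1 from rfl, pvSegs_tail,
        pvSegs_head_congr y (x ++ y) ys rest u (fun e he => hbs e (by simp [he]))]

lemma pvAlt_short (x y : String) (ys : List String) (h : PySem.Str.len y < 80) :
    merge_short_strings_recursive_alt (x :: y :: ys)
      = merge_short_strings_recursive_alt ((x ++ y) :: ys) := by
  rw [pvAlt_eq_segs, pvAlt_eq_segs, pvBrks_short x y ys h]
  exact pvSegs_merge x y ys _ (pvBrks_pos _)

lemma pvAlt_long (x y : String) (ys : List String) (h : 80 ≤ PySem.Str.len y) :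
    merge_short_strings_recursive_alt (x :: y :: ys)
      = x :: merge_short_strings_recursive_alt (y :: ys) := by
  rw [pvAlt_eq_segs, pvAlt_eq_segs, pvBrks_long x y ys h]
  simp only [pvSegs, List.drop_zero, Nat.sub_zero, List.take_succ_cons, List.take_zero]
  exact congrArg₂ _ (pvJoin_one x) (pvSegs_tail x (y :: ys) (pvBrks (y :: ys)) 0)

lemma pvAlt_single (x : String) : merge_short_strings_recursive_alt [x] = [x] := by
  rw [pvAlt_eq_segs, show pvBrks [x] = [] from rfl]
  simp only [pvSegs, List.drop_zero, Nat.sub_zero]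
  rw [List.take_of_length_le (by simp)]
  exact congrArg (fun s => [s]) (pvJoin_one x)

lemma pvAlt_eq_go (xs : List String) :
    ∀ c, merge_short_strings_recursive_alt (c :: xs) = pvGo c xs := by
  induction xs with
  | nil => intro c; rw [pvAlt_single]; rfl
  | cons y ys ih =>
    intro c
    by_cases h : PySem.Str.len y < 80
    · rw [pvGo, if_pos h, pvAlt_short c y ys h, ih]
    · rw [pvGo, if_neg h, pvAlt_long c y ys (by omega), ih]

lemma pvA_eq_go (xs : List String) :
    ∀ c, merge_short_strings_recursive (c :: xs) = pvGo c xs := by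
  induction xs with
  | nil => intro c; rw [merge_short_strings_recursive.eq_def]; rfl
  | cons y ys ih =>
    intro c
    by_cases h : PySem.Str.len y < 80
    · rw [show merge_short_strings_recursive (c :: y :: ys)
            = merge_short_strings_recursive ((c ++ y) :: ys) from by
          rw [merge_short_strings_recursive.eq_def]; exact if_pos h,
        pvGo, if_pos h, ih]
    · rw [show merge_short_strings_recursive (c :: y :: ys)
            = c :: merge_short_strings_recursive (y :: ys) from by
          rw [merge_short_strings_recursive.eq_def]; exact if_neg h,
        pvGo, if_neg h, ih]

-- ===== VERDICT (by name: the statement is the Claim_ definition above) =====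
theorem merge_short_strings_recursive_spec : Claim_equal_merge_short_strings_recursive := by
  intro data _
  unfold Spec_merge_short_strings_recursive
  cases data with
  | nil => rw [merge_short_strings_recursive.eq_def]; rfl
  | cons c xs => rw [pvA_eq_go, pvAlt_eq_go]
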